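-- pv_equiv track=rewrite | github.com/Averbea/AdventOfCode | 2023/9/solution.py | calc_diffs
-- ===== SOURCE A (Python) =====
-- def calc_diffs(line):
--     diffs = [line]
--     cur = line
--
--     while any([x != 0 for x in cur]):
--         cur_diffs = []
--         for i in range(len(cur) - 1):
--             cur_diffs.append(cur[i + 1] - cur[i])
--         diffs.append(cur_diffs)
--         cur = cur_diffs
--     return diffs
-- ===== SOURCE B (Python) =====
-- def calc_diffs(line):
--     if any(x != 0 for x in line):
--         return [line] + calc_diffs([b - a for a, b in zip(line, line[1:])])
--     return [line]
-- ===== Notes on version B (the rewrite author's own statement) =====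
-- stated objective: simpler
-- what changed: Replaces the imperative while-loop with an explicit diffs accumulator and an index-based inner append loop by a short structural recursion that builds one zip-based difference level per call and concatenates the levels.
import Mathlib
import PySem

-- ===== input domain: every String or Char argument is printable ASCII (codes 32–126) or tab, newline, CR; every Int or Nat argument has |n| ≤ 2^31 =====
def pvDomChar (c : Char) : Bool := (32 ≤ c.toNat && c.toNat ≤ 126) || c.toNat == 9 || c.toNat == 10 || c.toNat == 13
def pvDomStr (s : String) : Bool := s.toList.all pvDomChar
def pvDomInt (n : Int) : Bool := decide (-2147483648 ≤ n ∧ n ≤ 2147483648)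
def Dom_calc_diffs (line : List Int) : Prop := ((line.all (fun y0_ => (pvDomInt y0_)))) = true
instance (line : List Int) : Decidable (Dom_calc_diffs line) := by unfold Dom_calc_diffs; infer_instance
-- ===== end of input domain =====

-- B replaces A's while-loop with explicit accumulator by a structural recursion building one zip-based difference level per call (objective: simpler).


-- ===== PORT A =====
-- the while loop: state is (diffs, cur); each entered iteration shortens cur by one
def calcDiffsLoop (diffs : List (List Int)) (cur : List Int) : List (List Int) :=
  if h : cur.any (fun x => x ≠ 0) then
    -- for i in range(len(cur) - 1): cur_diffs.append(cur[i+1] - cur[i])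
    let cur_diffs :=
      (PySem.List.pyRange 0 ((cur.length : Int) - 1) 1).foldl
        (fun acc i => acc ++ [PySem.List.pyGetD cur (i + 1) 0 - PySem.List.pyGetD cur i 0]) []
    calcDiffsLoop (diffs ++ [cur_diffs]) cur_diffs
  else diffs
termination_by cur.length
decreasing_by
  simp only [PySem.List.foldl_append_singleton_eq_map, List.nil_append, List.length_map,
    PySem.List.length_pyRange_one]
  have hne : cur ≠ [] := by
    intro hnil; subst hnil; simp at h
  have : 0 < cur.length := List.length_pos_iff.mpr hne
  omega

def calc_diffs (line : List Int) : List (List Int) :=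
  calcDiffsLoop [line] line

-- ===== PORT B =====
def calc_diffs_alt (line : List Int) : List (List Int) :=
  if h : line.any (fun x => x ≠ 0) then
    line :: calc_diffs_alt (List.zipWith (fun a b => b - a) line line.tail)
  else [line]
termination_by line.length
decreasing_by
  have hne : line ≠ [] := by
    intro hnil; subst hnil; simp at h
  have : 0 < line.length := List.length_pos_iff.mpr hne
  simp [List.length_zipWith]
  omega

-- ===== PRECONDITION & SPEC =====
def Spec_calc_diffs (line : List Int) (out : List (List Int)) : Prop := out = calc_diffs_alt line
instance (line : List Int) (out : List (List Int)) : Decidable (Spec_calc_diffs line out) := by unfold Spec_calc_diffs; infer_instance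

-- ===== CLAIM (what is proved, stated in full; the proofs are below) =====
def Claim_equal_calc_diffs : Prop := ∀ (line : List Int), Dom_calc_diffs line → Spec_calc_diffs line (calc_diffs line)

-- ===== LEMMAS AND PROOFS =====

-- A's index-loop difference level equals B's zip-based one
theorem diffLevel_eq (cur : List Int) :
    (PySem.List.pyRange 0 ((cur.length : Int) - 1) 1).foldl
        (fun acc i => acc ++ [PySem.List.pyGetD cur (i + 1) 0 - PySem.List.pyGetD cur i 0]) []
      = List.zipWith (fun a b => b - a) cur cur.tail := by
  rw [PySem.List.foldl_append_singleton_eq_map, List.nil_append]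
  apply List.ext_getElem
  · cases cur with
    | nil => simp
    | cons a t => simp [PySem.List.length_pyRange_one, List.length_zipWith]
  · intro k h1 h2
    simp only [List.length_map, PySem.List.length_pyRange_one] at h1
    have hk1 : k + 1 < cur.length := by omega
    simp [PySem.List.getElem_pyRange_one, List.getElem_zipWith, List.getElem_tail]
    rw [List.getElem?_eq_getElem (by omega : k < cur.length)]
    rw [PySem.List.pyGetD_eq_getElem cur (i := (k : Int) + 1) 0 (by omega) (by omega)]
    have hcast : (((k : Int)) + 1).toNat = k + 1 := by omega
    simp [hcast]

-- B always returns its argument as the head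
theorem alt_cons (line : List Int) :
    calc_diffs_alt line = line :: (calc_diffs_alt line).tail := by
  rw [calc_diffs_alt]
  split <;> simp

-- loop invariant: the loop appends exactly B's remaining levels
theorem loop_eq (n : ℕ) : ∀ (cur : List Int), cur.length = n →
    ∀ (diffs : List (List Int)),
      calcDiffsLoop diffs cur = diffs ++ (calc_diffs_alt cur).tail := by
  induction n using Nat.strong_induction_on with
  | _ n ih =>
    intro cur hlen diffs
    rw [calcDiffsLoop]
    by_cases h : cur.any (fun x => x ≠ 0)
    · simp only [h, dif_pos]
      rw [diffLevel_eq]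
      have hne : cur ≠ [] := by intro hnil; subst hnil; simp at h
      have hpos : 0 < cur.length := List.length_pos_iff.mpr hne
      have hlt : (List.zipWith (fun a b => b - a) cur cur.tail).length < n := by
        simp [List.length_zipWith]; omega
      rw [ih _ hlt _ rfl]
      conv_rhs => rw [calc_diffs_alt]
      simp only [h, dif_pos, List.tail_cons]
      rw [alt_cons (List.zipWith (fun a b => b - a) cur cur.tail)]
      simp
    · simp only [h]
      rw [calc_diffs_alt, dif_neg h]
      simp

-- ===== VERDICT (by name: the statement is the Claim_ definition above) =====
theorem calc_diffs_spec : Claim_equal_calc_diffs := by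
  intro line _
  unfold Spec_calc_diffs calc_diffs
  rw [loop_eq line.length line rfl]
  rw [alt_cons line]
  simp
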